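-- pv_equiv track=rewrite | github.com/zjashanda/Trisolaris | tools/debug/generate_detailed_bundle_report.py | render_overview
-- ===== SOURCE A (Python) =====
-- from typing import Any
--
-- def render_overview(case_results: list[dict[str, Any]]) -> list[str]:
--     pass_count = sum(1 for item in case_results if item["status"] == "PASS")
--     fail_count = sum(1 for item in case_results if item["status"] == "FAIL")
--     blocked_count = sum(1 for item in case_results if item["status"] == "BLOCKED")
--     todo_count = sum(1 for item in case_results if item["status"] == "TODO")
--     return [
--         f"- 已记录用例数：`{len(case_results)}`",
--         f"- 通过：`{pass_count}`",
--         f"- 失败：`{fail_count}`",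
--         f"- 阻塞：`{blocked_count}`",
--         f"- 待人工：`{todo_count}`",
--     ]
-- ===== SOURCE B (Python) =====
-- def render_overview(case_results: list) -> list:
--     counts = {}
--     for item in case_results:
--         s = item["status"]
--         counts[s] = counts.get(s, 0) + 1
--     return [
--         f"- 已记录用例数：`{len(case_results)}`",
--         f"- 通过：`{counts.get('PASS', 0)}`",
--         f"- 失败：`{counts.get('FAIL', 0)}`",
--         f"- 阻塞：`{counts.get('BLOCKED', 0)}`",
--         f"- 待人工：`{counts.get('TODO', 0)}`",
--     ]
-- ===== Notes on version B (the rewrite author's own statement) =====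
-- stated objective: simpler
-- what changed: Replaces A's four independent generator scans of case_results (one per status) with a single tally pass building a status->count dict, then formats the lines from dict lookups defaulting to 0.
import Mathlib
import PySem

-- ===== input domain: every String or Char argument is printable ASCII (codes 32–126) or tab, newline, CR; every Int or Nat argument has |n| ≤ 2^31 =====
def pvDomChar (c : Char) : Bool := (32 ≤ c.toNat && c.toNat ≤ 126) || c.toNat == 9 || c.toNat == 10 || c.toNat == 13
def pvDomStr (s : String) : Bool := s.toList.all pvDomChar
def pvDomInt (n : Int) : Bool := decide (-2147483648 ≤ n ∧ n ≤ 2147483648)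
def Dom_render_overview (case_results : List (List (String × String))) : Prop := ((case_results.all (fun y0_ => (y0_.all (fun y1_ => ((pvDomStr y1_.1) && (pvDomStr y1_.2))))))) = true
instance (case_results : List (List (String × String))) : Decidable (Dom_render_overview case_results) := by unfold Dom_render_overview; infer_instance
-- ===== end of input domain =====

-- B replaces A's four independent scans with one tally pass over case_results plus dict lookups (simpler; return-value equivalence).
-- ===== PORT A =====
-- item["status"] (first matching key; Pre_ guarantees the key is present)
def statusOf (item : List (String × String)) : String :=
  ((PySem.Dict.mk item).get? "status").getD ""

def render_overview (case_results : List (List (String × String))) : List String :=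
  let pass_count := case_results.foldl (fun acc item => if statusOf item == "PASS" then acc + 1 else acc) (0 : Int)
  let fail_count := case_results.foldl (fun acc item => if statusOf item == "FAIL" then acc + 1 else acc) (0 : Int)
  let blocked_count := case_results.foldl (fun acc item => if statusOf item == "BLOCKED" then acc + 1 else acc) (0 : Int)
  let todo_count := case_results.foldl (fun acc item => if statusOf item == "TODO" then acc + 1 else acc) (0 : Int)
  [ "- 已记录用例数：`" ++ PySem.Int.toStr (case_results.length : Int) ++ "`"
  , "- 通过：`" ++ PySem.Int.toStr pass_count ++ "`"
  , "- 失败：`" ++ PySem.Int.toStr fail_count ++ "`"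
  , "- 阻塞：`" ++ PySem.Int.toStr blocked_count ++ "`"
  , "- 待人工：`" ++ PySem.Int.toStr todo_count ++ "`" ]

-- ===== PORT B =====
-- counts[s] = counts.get(s, 0) + 1, a single tally pass
def render_overview_alt (case_results : List (List (String × String))) : List String :=
  let counts := case_results.foldl (fun d item => d.modify (statusOf item) 0 (· + 1)) (PySem.Dict.empty : PySem.Dict String Int)
  [ "- 已记录用例数：`" ++ PySem.Int.toStr (case_results.length : Int) ++ "`"
  , "- 通过：`" ++ PySem.Int.toStr (counts.getD "PASS" 0) ++ "`"
  , "- 失败：`" ++ PySem.Int.toStr (counts.getD "FAIL" 0) ++ "`"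
  , "- 阻塞：`" ++ PySem.Int.toStr (counts.getD "BLOCKED" 0) ++ "`"
  , "- 待人工：`" ++ PySem.Int.toStr (counts.getD "TODO" 0) ++ "`" ]

-- ===== PRECONDITION & SPEC =====
-- Pre_ excludes items without a "status" key, on which both Pythons raise KeyError.
def Pre_render_overview (case_results : List (List (String × String))) : Prop :=
  case_results.all (fun item => (PySem.Dict.mk item).contains "status") = true
instance (case_results : List (List (String × String))) : Decidable (Pre_render_overview case_results) := by unfold Pre_render_overview; infer_instance
def pvWitness_render_overview : (List (List (String × String))) := [[("status", "PASS")], [("status", "FAIL")]]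
def Spec_render_overview (case_results : List (List (String × String))) (out : List String) : Prop := out = render_overview_alt case_results
instance (case_results : List (List (String × String))) (out : List String) : Decidable (Spec_render_overview case_results out) := by unfold Spec_render_overview; infer_instance

-- ===== CLAIM (what is proved, stated in full; the proofs are below) =====
def Claim_equal_render_overview : Prop := ∀ (case_results : List (List (String × String))), Dom_render_overview case_results → Pre_render_overview case_results → Spec_render_overview case_results (render_overview case_results)

-- ===== LEMMAS AND PROOFS =====
-- A's conditional-sum for one status equals B's tally-dict lookup for that status.
lemma count_eq_tally (cr : List (List (String × String))) (v : String) :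
    cr.foldl (fun acc item => if statusOf item == v then acc + 1 else acc) (0 : Int)
      = (cr.foldl (fun d item => d.modify (statusOf item) 0 (· + 1)) (PySem.Dict.empty : PySem.Dict String Int)).getD v 0 := by
  have h1 : cr.foldl (fun d item => d.modify (statusOf item) 0 (· + 1)) (PySem.Dict.empty : PySem.Dict String Int)
      = (cr.map statusOf).foldl (fun (d : PySem.Dict String Int) x => d.modify x 0 (· + 1)) PySem.Dict.empty :=
    by rw [List.foldl_map]
  have h2 : cr.foldl (fun acc item => if statusOf item == v then acc + 1 else acc) (0 : Int)
      = (cr.map statusOf).foldl (fun (acc : Int) x => if x == v then acc + 1 else acc) 0 :=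
    by rw [List.foldl_map]
  rw [h1, h2, PySem.Dict.getD_foldl_modify_add_one, PySem.List.foldl_count_if]
  simp [List.count, List.countP_map]

-- ===== VERDICT (by name: the statement is the Claim_ definition above) =====
theorem render_overview_spec : Claim_equal_render_overview := by
  intro cr _ _
  unfold Spec_render_overview render_overview render_overview_alt
  simp only [count_eq_tally]
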